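-- pv_equiv track=rewrite | github.com/hshrN/SENG-401-Project | backend/domain/game.py | compute_lingering_pressure
-- ===== SOURCE A (Python) =====
-- def compute_lingering_pressure(recent_deltas: list[int]) -> int:
--     """
--     Convert the last few realized deltas for one metric into a pressure penalty.
--     Repeated neglect causes future choices to underperform until the player stabilizes it.
--     """
--     if not recent_deltas:
--         return 0
--
--     negative_total = sum(delta for delta in recent_deltas if delta < 0)
--     pressure = 0
--
--     if negative_total <= -6:
--         pressure += 1
--     if negative_total <= -12:
--         pressure += 1
--
--     trailing_losses = 0
--     for delta in reversed(recent_deltas):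
--         if delta < 0:
--             trailing_losses += 1
--         else:
--             break
--
--     if trailing_losses >= 2:
--         pressure += 1
--
--     return min(3, pressure)
-- ===== SOURCE B (Python) =====
-- def compute_lingering_pressure(recent_deltas: list[int]) -> int:
--     """One forward pass: accumulate negative total and trailing-loss streak together."""
--     negative_total = 0
--     streak = 0
--     for delta in recent_deltas:
--         if delta < 0:
--             negative_total += delta
--             streak += 1
--         else:
--             streak = 0
--     pressure = 0
--     if negative_total <= -6:
--         pressure += 1
--     if negative_total <= -12:
--         pressure += 1
--     if streak >= 2:
--         pressure += 1
--     return min(3, pressure)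
-- ===== Notes on version B (the rewrite author's own statement) =====
-- stated objective: alternative
-- what changed: Replaces A's two separate passes (a sum comprehension plus a reversed loop with break for trailing losses) by one forward loop carrying two accumulators, the trailing streak being maintained by reset-on-nonnegative.
import Mathlib
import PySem

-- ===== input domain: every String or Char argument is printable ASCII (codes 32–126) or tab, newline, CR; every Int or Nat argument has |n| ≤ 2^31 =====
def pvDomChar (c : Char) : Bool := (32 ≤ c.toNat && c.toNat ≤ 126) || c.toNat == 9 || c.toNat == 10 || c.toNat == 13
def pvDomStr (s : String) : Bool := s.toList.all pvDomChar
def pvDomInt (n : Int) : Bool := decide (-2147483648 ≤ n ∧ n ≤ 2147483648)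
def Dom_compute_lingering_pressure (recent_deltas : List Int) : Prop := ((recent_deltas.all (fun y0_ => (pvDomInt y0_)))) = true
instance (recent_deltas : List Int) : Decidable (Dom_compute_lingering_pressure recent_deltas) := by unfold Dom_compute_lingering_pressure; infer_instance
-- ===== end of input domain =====

-- B computes the negative total and the trailing-loss streak in a single forward pass
-- (streak reset on non-negative deltas) instead of A's separate sum and reversed-break loop; alternative decomposition, same cost.


-- ===== PORT A =====
-- A's reversed loop with break: count leading negatives of the reversed list.
def pvTrailA : List Int → Int → Int
  | [], acc => acc
  | d :: rest, acc => if d < 0 then pvTrailA rest (acc + 1) else acc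

def compute_lingering_pressure (recent_deltas : List Int) : Int :=
  if recent_deltas = [] then 0
  else
    let negative_total := (recent_deltas.filter (fun d => d < 0)).sum
    let pressure : Int := 0
    let pressure := if negative_total ≤ -6 then pressure + 1 else pressure
    let pressure := if negative_total ≤ -12 then pressure + 1 else pressure
    let trailing_losses := pvTrailA recent_deltas.reverse 0
    let pressure := if trailing_losses ≥ 2 then pressure + 1 else pressure
    min 3 pressure

-- ===== PORT B =====
def compute_lingering_pressure_alt (recent_deltas : List Int) : Int :=
  let st := recent_deltas.foldl
    (fun (p : Int × Int) d => if d < 0 then (p.1 + d, p.2 + 1) else (p.1, 0)) (0, 0)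
  let pressure : Int := 0
  let pressure := if st.1 ≤ -6 then pressure + 1 else pressure
  let pressure := if st.1 ≤ -12 then pressure + 1 else pressure
  let pressure := if st.2 ≥ 2 then pressure + 1 else pressure
  min 3 pressure

-- ===== PRECONDITION & SPEC =====
def Spec_compute_lingering_pressure (recent_deltas : List Int) (out : Int) : Prop := out = compute_lingering_pressure_alt recent_deltas
instance (recent_deltas : List Int) (out : Int) : Decidable (Spec_compute_lingering_pressure recent_deltas out) := by unfold Spec_compute_lingering_pressure; infer_instance

-- ===== CLAIM (what is proved, stated in full; the proofs are below) =====
def Claim_equal_compute_lingering_pressure : Prop := ∀ (recent_deltas : List Int), Dom_compute_lingering_pressure recent_deltas → Spec_compute_lingering_pressure recent_deltas (compute_lingering_pressure recent_deltas)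

-- ===== LEMMAS AND PROOFS =====

theorem pvTrailA_acc (l : List Int) (acc : Int) : pvTrailA l acc = acc + pvTrailA l 0 := by
  induction l generalizing acc with
  | nil => simp [pvTrailA]
  | cons d rest ih =>
    simp only [pvTrailA]
    split_ifs with h
    · rw [ih (acc + 1), ih (0 + 1)]; ring
    · simp

theorem pvFold_spec (l : List Int) :
    l.foldl (fun (p : Int × Int) d => if d < 0 then (p.1 + d, p.2 + 1) else (p.1, 0)) (0, 0)
      = ((l.filter (fun d => d < 0)).sum, pvTrailA l.reverse 0) := by
  induction l using List.reverseRecOn with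
  | nil => simp [pvTrailA]
  | append_singleton l d ih =>
    rw [List.foldl_append, ih]
    simp only [List.foldl, List.filter_append, List.sum_append, List.reverse_append,
      List.reverse_singleton, List.singleton_append, pvTrailA]
    split_ifs with h
    · simp [h, pvTrailA_acc l.reverse 1]; ring_nf
    · simp [h]

theorem compute_lingering_pressure_eq (l : List Int) :
    compute_lingering_pressure l = compute_lingering_pressure_alt l := by
  unfold compute_lingering_pressure compute_lingering_pressure_alt
  rw [pvFold_spec]
  by_cases h : l = []
  · subst h; simp [pvTrailA]
  · simp [h]

-- ===== VERDICT (by name: the statement is the Claim_ definition above) =====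
theorem compute_lingering_pressure_spec : Claim_equal_compute_lingering_pressure := by
  intro l _
  unfold Spec_compute_lingering_pressure
  exact compute_lingering_pressure_eq l
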